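-- pv_equiv track=rewrite | github.com/Skyyyy0920/ARNN-implementation | data_pre_with_category.py | ptp_dict
-- ===== SOURCE A (Python) =====
-- def ptp_dict(tim_dis_rel):
--     tim_dis = {}
--     count = 0
--     for id in tim_dis_rel:
--         if tuple(id) not in tim_dis.keys():
--             tim_dis[tuple(id)] = count
--             count = count + 1
--     return tim_dis
-- ===== SOURCE B (Python) =====
-- def ptp_dict(tim_dis_rel):
--     # Recursive decomposition: the first tuple gets index 0; remove all of its
--     # occurrences from the rest, recurse, and shift every recursive index by 1.
--     if not tim_dis_rel:
--         return {}
--     head = tuple(tim_dis_rel[0])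
--     rest = ptp_dict([x for x in tim_dis_rel[1:] if tuple(x) != head])
--     out = {head: 0}
--     for k, v in rest.items():
--         out[k] = v + 1
--     return out
-- ===== Notes on version B (the rewrite author's own statement) =====
-- stated objective: alternative
-- what changed: Replaces A's single iterative pass with a membership test and an explicit counter by a recursion on the structure: the head tuple gets index 0, its occurrences are filtered out of the tail, and the recursive result's indices are shifted by 1.
import Mathlib
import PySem

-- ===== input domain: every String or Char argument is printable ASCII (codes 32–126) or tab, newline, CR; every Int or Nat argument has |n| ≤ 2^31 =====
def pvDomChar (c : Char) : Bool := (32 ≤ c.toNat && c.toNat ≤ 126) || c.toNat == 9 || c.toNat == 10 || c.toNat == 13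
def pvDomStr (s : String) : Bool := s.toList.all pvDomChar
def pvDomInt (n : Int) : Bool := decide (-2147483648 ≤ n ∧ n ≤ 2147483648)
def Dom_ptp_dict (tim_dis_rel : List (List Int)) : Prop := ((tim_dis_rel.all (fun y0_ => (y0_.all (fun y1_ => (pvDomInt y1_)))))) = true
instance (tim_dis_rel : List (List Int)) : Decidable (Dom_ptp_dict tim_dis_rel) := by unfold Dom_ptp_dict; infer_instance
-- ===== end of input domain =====

-- B replaces A's iterative membership-test-and-count loop by a recursion on the list:
-- head gets index 0, its occurrences are filtered from the tail, recursive indices shift by 1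
-- (alternative decomposition; return value only, A mutates nothing observable).

-- ===== PORT A =====
-- for id in tim_dis_rel: if tuple(id) not in tim_dis.keys(): tim_dis[tuple(id)] = count; count += 1
def ptp_dict (tim_dis_rel : List (List Int)) : List (List Int × Int) :=
  (tim_dis_rel.foldl
    (fun (st : PySem.Dict (List Int) Int × Int) id =>
      if st.1.contains id then st else (st.1.insert id st.2, st.2 + 1))
    (PySem.Dict.empty, 0)).1.items

-- ===== PORT B =====
-- if empty: {}; else rest = ptp_dict(filter(!= head, tail)); {head: 0} then k: v+1 for rest
def ptp_dict_alt : List (List Int) → List (List Int × Int)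
  | [] => []
  | x :: xs =>
    let rest := ptp_dict_alt (xs.filter (fun y => y ≠ x))
    (x, 0) :: rest.map (fun p => (p.1, p.2 + 1))
termination_by l => l.length
decreasing_by
  simp only [List.length_unattach, List.length_cons]
  exact Nat.lt_succ_of_le (le_trans (List.length_filter_le _ _) (by simp))

-- ===== PRECONDITION & SPEC =====
def Spec_ptp_dict (tim_dis_rel : List (List Int)) (out : List (List Int × Int)) : Prop := out = ptp_dict_alt tim_dis_rel
instance (tim_dis_rel : List (List Int)) (out : List (List Int × Int)) : Decidable (Spec_ptp_dict tim_dis_rel out) := by unfold Spec_ptp_dict; infer_instance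

-- ===== CLAIM (what is proved, stated in full; the proofs are below) =====
def Claim_equal_ptp_dict : Prop := ∀ (tim_dis_rel : List (List Int)), Dom_ptp_dict tim_dis_rel → Spec_ptp_dict tim_dis_rel (ptp_dict tim_dis_rel)

-- ===== LEMMAS AND PROOFS =====

-- A's loop invariant: from a dict whose items are its keys enumerated (swapped) and whose
-- count equals its number of keys, the loop yields the running ordered set, enumerated.
theorem ptp_loop (l : List (List Int)) :
    ∀ (d : PySem.Dict (List Int) Int), d.keys.Nodup →
    d.items = (PySem.List.enumerate d.keys 0).map (fun p => (p.2, p.1)) →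
    (l.foldl
      (fun (st : PySem.Dict (List Int) Int × Int) id =>
        if st.1.contains id then st else (st.1.insert id st.2, st.2 + 1))
      (d, (d.keys.length : Int))).1.items
      = (PySem.List.enumerate (l.foldl PySem.Set.add d.keys) 0).map (fun p => (p.2, p.1)) := by
  induction l with
  | nil => intro d _ hitems; simpa using hitems
  | cons x xs ih =>
    intro d hnd hitems
    simp only [List.foldl_cons]
    by_cases hc : d.contains x = true
    · have hmem : x ∈ d.keys := (PySem.Dict.contains_iff_mem_keys d x).mp hc
      have hadd : PySem.Set.add d.keys x = d.keys := PySem.Set.add_of_mem hmem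
      rw [hc]
      simp only [if_true, hadd]
      exact ih d hnd hitems
    · have hc' : d.contains x = false := by simpa using hc
      have hmem : x ∉ d.keys := fun h => hc ((PySem.Dict.contains_iff_mem_keys d x).mpr h)
      rw [hc']
      simp only [Bool.false_eq_true, if_false]
      have hkeys : (d.insert x (d.keys.length : Int)).keys = d.keys ++ [x] :=
        PySem.Dict.keys_insert_of_not_contains d _ hc'
      have hnd' : (d.insert x (d.keys.length : Int)).keys.Nodup := by
        rw [hkeys]; simpa using List.Nodup.append hnd (List.nodup_singleton x)
          (by simpa using hmem)
      have hitems' : (d.insert x (d.keys.length : Int)).items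
          = (PySem.List.enumerate (d.insert x (d.keys.length : Int)).keys 0).map (fun p => (p.2, p.1)) := by
        rw [PySem.Dict.items_insert_of_not_contains d _ hc', hkeys, hitems,
          PySem.List.enumerate_append]
        simp [PySem.List.enumerate_cons, PySem.List.enumerate_nil]
      have hlen : ((d.keys.length : Int) + 1) = (((d.insert x (d.keys.length : Int)).keys.length : Int)) := by
        rw [hkeys]; simp
      have hadd : PySem.Set.add d.keys x = d.keys ++ [x] := PySem.Set.add_of_not_mem hmem
      rw [hlen, ih _ hnd' hitems', hkeys, hadd]

-- A computes the first-occurrence dedup, enumerated and swapped.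
theorem ptp_dict_enum (l : List (List Int)) :
    ptp_dict l = (PySem.List.enumerate (PySem.List.dedup l) 0).map (fun p => (p.2, p.1)) := by
  unfold ptp_dict
  have h := ptp_loop l PySem.Dict.empty (by simp [PySem.Dict.keys_empty])
    (by simp [PySem.Dict.keys_empty, PySem.List.enumerate_nil]; rfl)
  simp only [PySem.Dict.keys_empty, List.length_nil, Int.natCast_zero] at h
  rw [h, PySem.List.dedup_eq_ofList, PySem.Set.ofList_eq_foldl]

-- Skipping elements equal to an x already in the accumulator does not change foldl Set.add.
theorem foldl_add_filter (x : List Int) :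
    ∀ (l : List (List Int)) (s : List (List Int)), x ∈ s →
      List.foldl PySem.Set.add s (l.filter (fun y => y ≠ x)) = List.foldl PySem.Set.add s l := by
  intro l
  induction l with
  | nil => intro s _; rfl
  | cons y ys ih =>
    intro s hx
    by_cases hyx : y = x
    · subst hyx
      have h1 : (y :: ys).filter (fun z => z ≠ y) = ys.filter (fun z => z ≠ y) := by
        simp
      rw [h1, List.foldl_cons, PySem.Set.add_of_mem hx, ih s hx]
    · have hx' : x ∈ PySem.Set.add s y := by
        simp [PySem.Set.add]; split <;> simp [hx]
      have h1 : (y :: ys).filter (fun z => z ≠ x) = y :: ys.filter (fun z => z ≠ x) := by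
        simp [hyx]
      rw [h1, List.foldl_cons, List.foldl_cons, ih _ hx']

-- An accumulator head not occurring later stays in front of foldl Set.add.
theorem foldl_add_cons :
    ∀ (l : List (List Int)) (a : List Int) (s : List (List Int)), a ∉ l → a ∉ s →
      List.foldl PySem.Set.add (a :: s) l = a :: List.foldl PySem.Set.add s l := by
  intro l
  induction l with
  | nil => intro a s _ _; rfl
  | cons y ys ih =>
    intro a s hal has
    have hya : ¬ (y = a) := fun h => hal (h ▸ List.mem_cons_self ..)
    have hstep : PySem.Set.add (a :: s) y = a :: PySem.Set.add s y := by
      simp [PySem.Set.add, hya]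
      split <;> simp
    have hal' : a ∉ ys := fun h => hal (List.mem_cons_of_mem _ h)
    have hay : a ≠ y := fun h => hya h.symm
    have has' : a ∉ PySem.Set.add s y := by
      simp [PySem.Set.add]; split
      · exact has
      · simp [has, hay]
    simp [List.foldl_cons, hstep, ih a _ hal' has']

-- dedup commutes with the head/filter decomposition B uses.
theorem dedup_cons_filter (x : List Int) (xs : List (List Int)) :
    PySem.List.dedup (x :: xs) = x :: PySem.List.dedup (xs.filter (fun y => y ≠ x)) := by
  rw [PySem.List.dedup_eq_ofList, PySem.List.dedup_eq_ofList,
    PySem.Set.ofList_eq_foldl, PySem.Set.ofList_eq_foldl]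
  have h0 : (List.foldl PySem.Set.add [] (x :: xs) : List (List Int))
      = List.foldl PySem.Set.add [x] xs := by
    simp [List.foldl_cons, PySem.Set.add]
  rw [h0, ← foldl_add_filter x xs [x] (List.mem_singleton_self x)]
  exact foldl_add_cons _ x [] (by simp [List.mem_filter]) (by simp)

-- Shifting the enumeration start by one adds one to every index.
theorem enumerate_succ {α : Type} :
    ∀ (l : List α) (s : Int), PySem.List.enumerate l (s + 1)
      = (PySem.List.enumerate l s).map (fun p => (p.1 + 1, p.2)) := by
  intro l
  induction l with
  | nil => intro s; simp [PySem.List.enumerate_nil]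
  | cons y ys ih =>
    intro s
    simp [PySem.List.enumerate_cons, ih (s + 1)]

-- B computes the same enumerated dedup.
theorem ptp_alt_enum : ∀ (l : List (List Int)),
    ptp_dict_alt l = (PySem.List.enumerate (PySem.List.dedup l) 0).map (fun p => (p.2, p.1)) := by
  intro l
  induction hn : l.length using Nat.strong_induction_on generalizing l with
  | _ n ih =>
    cases l with
    | nil => simp [ptp_dict_alt, PySem.List.dedup, PySem.List.enumerate_nil]

    | cons x xs =>
      have hlt : (xs.filter (fun y => y ≠ x)).length < n := by
        subst hn; simpa using Nat.lt_succ_of_le (List.length_filter_le _ _)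
      have hrec := ih _ hlt (xs.filter (fun y => y ≠ x)) rfl
      have heq : ptp_dict_alt (x :: xs)
          = (x, 0) :: (ptp_dict_alt (xs.filter (fun y => y ≠ x))).map (fun p => (p.1, p.2 + 1)) := by
        simp [ptp_dict_alt]
      rw [heq, hrec, dedup_cons_filter, PySem.List.enumerate_cons]
      have : (0 : Int) + 1 = 1 := rfl
      rw [this, show (1 : Int) = 0 + 1 from rfl, enumerate_succ]
      simp [List.map_map, Function.comp]

theorem ptp_dict_eq (l : List (List Int)) : ptp_dict l = ptp_dict_alt l := by
  rw [ptp_dict_enum, ptp_alt_enum]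

-- ===== VERDICT (by name: the statement is the Claim_ definition above) =====
theorem ptp_dict_spec : Claim_equal_ptp_dict := by
  intro l _
  unfold Spec_ptp_dict
  exact ptp_dict_eq l
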